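-- pv_equiv track=rewrite | github.com/MartinCornelius/AOC2023 | day_12/sol.py | trySpringArrangement
-- ===== SOURCE A (Python) =====
-- def trySpringArrangement(springs, arrangement):
--     result = []
--     idx = 0
--     for x in range(len(springs)):
--         if springs[x] == "?":
--             result.append(arrangement[idx])
--             idx += 1
--         else:
--             result.append(springs[x])
--     return result
-- ===== SOURCE B (Python) =====
-- def trySpringArrangement(springs, arrangement):
--     positions = [i for i, c in enumerate(springs) if c == "?"]
--     result = list(springs)
--     for j, p in enumerate(positions):
--         result[p] = arrangement[j]
--     return result
-- ===== Notes on version B (the rewrite author's own statement) =====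
-- stated objective: alternative
-- what changed: B first builds an index list of the '?' positions, copies the string into a list, and then fills the blanks in a separate pass by absolute position, instead of A's single interleaved loop carrying a running arrangement counter.
import Mathlib
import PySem

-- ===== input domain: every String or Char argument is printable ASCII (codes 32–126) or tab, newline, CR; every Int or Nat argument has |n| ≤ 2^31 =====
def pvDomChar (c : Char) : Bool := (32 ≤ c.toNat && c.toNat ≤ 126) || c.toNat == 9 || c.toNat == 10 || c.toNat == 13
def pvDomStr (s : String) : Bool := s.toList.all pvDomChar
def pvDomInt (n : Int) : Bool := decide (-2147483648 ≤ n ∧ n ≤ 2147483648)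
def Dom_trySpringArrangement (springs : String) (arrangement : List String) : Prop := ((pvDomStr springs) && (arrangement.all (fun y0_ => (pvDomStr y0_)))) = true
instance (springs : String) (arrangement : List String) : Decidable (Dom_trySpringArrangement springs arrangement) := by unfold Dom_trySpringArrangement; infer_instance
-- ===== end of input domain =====

-- B copies the springs into a char list and then overwrites the '?' positions
-- (collected in a first pass) by absolute index in a second pass; same O(n) cost,
-- different decomposition. Return-value equivalence only (no observable mutation in A).

-- ===== PORT A =====
-- A: one loop over the characters carrying (result, idx); '?' consumes arrangement[idx].
def trySpringArrangement (springs : String) (arrangement : List String) : List String :=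
  (springs.toList.foldl
    (fun (st : List String × Int) c =>
      if c = '?' then
        (st.1 ++ [(PySem.List.pyGet? arrangement st.2).getD ""], st.2 + 1)
      else
        (st.1 ++ [String.mk [c]], st.2))
    ([], 0)).1

-- ===== PORT B =====
-- B: positions = indices of '?', result = list(springs), then result[p] = arrangement[j].
def trySpringArrangement_alt (springs : String) (arrangement : List String) : List String :=
  let positions : List Nat :=
    (springs.toList.zipIdx).filterMap (fun pc => if pc.1 = '?' then some pc.2 else none)
  let result : List String := springs.toList.map (fun c => String.mk [c])
  (positions.zipIdx).foldl
    (fun res pj => res.set pj.1 ((PySem.List.pyGet? arrangement (pj.2 : Int)).getD ""))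
    result

-- ===== PRECONDITION & SPEC =====
-- A raises IndexError (and B too) when there are more '?' than arrangement entries; excluded.
def Pre_trySpringArrangement (springs : String) (arrangement : List String) : Prop :=
  springs.toList.count '?' ≤ arrangement.length
instance (springs : String) (arrangement : List String) : Decidable (Pre_trySpringArrangement springs arrangement) := by unfold Pre_trySpringArrangement; infer_instance

def pvWitness_trySpringArrangement : String × List String := ("?a?.", ["x", "yy"])

def Spec_trySpringArrangement (springs : String) (arrangement : List String) (out : List String) : Prop := out = trySpringArrangement_alt springs arrangement
instance (springs : String) (arrangement : List String) (out : List String) : Decidable (Spec_trySpringArrangement springs arrangement out) := by unfold Spec_trySpringArrangement; infer_instance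

-- ===== CLAIM (what is proved, stated in full; the proofs are below) =====
def Claim_equal_trySpringArrangement : Prop := ∀ (springs : String) (arrangement : List String), Dom_trySpringArrangement springs arrangement → Pre_trySpringArrangement springs arrangement → Spec_trySpringArrangement springs arrangement (trySpringArrangement springs arrangement)

-- ===== LEMMAS AND PROOFS =====

def pvMk1 (c : Char) : String := String.mk [c]

/-- Common characterisation: substitute '?' by arrangement entries from index `i` on. -/
def pvSub (arr : List String) : List Char → Int → List String
  | [], _ => []
  | c :: cs, i =>
      if c = '?' then (PySem.List.pyGet? arr i).getD "" :: pvSub arr cs (i + 1)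
      else pvMk1 c :: pvSub arr cs i

/-- positions of '?' in `cs`, offset `k`. -/
def pvPos (cs : List Char) (k : Nat) : List Nat :=
  (cs.zipIdx k).filterMap (fun pc => if pc.1 = '?' then some pc.2 else none)

theorem pvPos_cons (c : Char) (cs : List Char) (k : Nat) :
    pvPos (c :: cs) k = if c = '?' then k :: pvPos cs (k + 1) else pvPos cs (k + 1) := by
  by_cases hc : c = '?' <;> simp [pvPos, List.zipIdx, hc]

theorem pvPos_shift (cs : List Char) (k : Nat) :
    pvPos cs (k + 1) = (pvPos cs k).map (· + 1) := by
  induction cs generalizing k with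
  | nil => simp [pvPos]
  | cons c cs ih =>
      rw [pvPos_cons, pvPos_cons]
      split <;> simp [ih]

theorem pv_zipIdx_map_succ (P : List Nat) (m : Nat) :
    (P.map (· + 1)).zipIdx m = (P.zipIdx m).map (fun pj => (pj.1 + 1, pj.2)) := by
  induction P generalizing m with
  | nil => simp
  | cons p P ih => simp [List.zipIdx, ih]

theorem pv_foldl_set_shift (f : Nat → String) (qs : List (Nat × Nat)) (x : String)
    (rest : List String) :
    (qs.map (fun pj => (pj.1 + 1, pj.2))).foldl
        (fun res pj => res.set pj.1 (f pj.2)) (x :: rest)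
      = x :: qs.foldl (fun res pj => res.set pj.1 (f pj.2)) rest := by
  induction qs generalizing rest with
  | nil => simp
  | cons q qs ih => simp [List.set, ih]

theorem pvB_core (arr : List String) (cs : List Char) (n : Nat) :
    ((pvPos cs 0).zipIdx n).foldl
        (fun res pj => res.set pj.1 ((PySem.List.pyGet? arr (pj.2 : Int)).getD ""))
        (cs.map pvMk1)
      = pvSub arr cs (n : Int) := by
  induction cs generalizing n with
  | nil => simp [pvPos, pvSub]
  | cons c cs ih =>
      rw [pvPos_cons]
      by_cases hc : c = '?'
      · subst hc
        rw [if_pos rfl, pvPos_shift]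
        simp only [List.zipIdx, List.foldl_cons, List.map_cons, List.set]
        rw [pv_zipIdx_map_succ,
          pv_foldl_set_shift (fun j => (PySem.List.pyGet? arr (j : Int)).getD "")]
        rw [ih (n + 1)]
        simp [pvSub, pvMk1]
      · simp only [if_neg hc]
        rw [pvPos_shift]
        simp only [List.map_cons]
        rw [pv_zipIdx_map_succ,
          pv_foldl_set_shift (fun j => (PySem.List.pyGet? arr (j : Int)).getD "")]
        rw [ih n]
        simp [pvSub, hc, pvMk1]

theorem pvA_core (arr : List String) (cs : List Char) (acc : List String) (i : Int) :
    (cs.foldl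
       (fun (st : List String × Int) c =>
         if c = '?' then
           (st.1 ++ [(PySem.List.pyGet? arr st.2).getD ""], st.2 + 1)
         else
           (st.1 ++ [String.mk [c]], st.2))
       (acc, i)).1 = acc ++ pvSub arr cs i := by
  induction cs generalizing acc i with
  | nil => simp [pvSub]
  | cons c cs ih =>
      by_cases hc : c = '?'
      · simp [hc, pvSub, ih]
      · simp [hc, pvSub, ih, pvMk1]

-- ===== VERDICT (by name: the statement is the Claim_ definition above) =====
theorem trySpringArrangement_spec : Claim_equal_trySpringArrangement := by
  intro springs arrangement _ _
  unfold Spec_trySpringArrangement trySpringArrangement trySpringArrangement_alt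
  rw [pvA_core]
  have hB := pvB_core arrangement springs.toList 0
  simp only [Nat.cast_zero] at hB
  simp only [List.nil_append]
  rw [← hB]
  rfl
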